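-- pv_equiv track=rewrite | github.com/OverdriveCode/Deep-Woods | main.py | check_how_many
-- ===== SOURCE A (Python) =====
-- def check_how_many(item):
--
--     check = False
--     final = ''
--
--     for char in item:
--         other_check = False
--
--         try:
--             total = int(char)
--             other_check = True
--         except:
--             other_check = False
--
--         if check is True and other_check is True:
--             final = f'{final}{total}'
--         if char == 'x':
--             check = True
--
--     return int(final)
-- ===== SOURCE B (Python) =====
-- def check_how_many(item):
--     # Split once at the first 'x' (tail is '' when there is no 'x'), then fold the
--     # digits of the tail into an integer arithmetically (Horner), never building a
--     # digit string or calling int(); no digit at all -> ValueError, as in A.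
--     tail = item.partition('x')[2]
--     value = None
--     for c in tail:
--         if '0' <= c <= '9':
--             value = (0 if value is None else value) * 10 + (ord(c) - 48)
--     if value is None:
--         raise ValueError("no digits after the first 'x'")
--     return value
-- ===== Notes on version B (the rewrite author's own statement) =====
-- stated objective: alternative
-- what changed: B splits the string once at the first 'x' (str.partition) and folds the digits of the tail directly into an integer with Horner's rule (value*10 + ord(c)-48), never carrying A's seen-'x' flag, never probing characters with try/except int(char), and never building a digit string to hand to int(); Pre_ excludes the inputs where A raises ValueError (no 'x', or no digit after the first 'x'), where B raises too.
import Mathlib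
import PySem

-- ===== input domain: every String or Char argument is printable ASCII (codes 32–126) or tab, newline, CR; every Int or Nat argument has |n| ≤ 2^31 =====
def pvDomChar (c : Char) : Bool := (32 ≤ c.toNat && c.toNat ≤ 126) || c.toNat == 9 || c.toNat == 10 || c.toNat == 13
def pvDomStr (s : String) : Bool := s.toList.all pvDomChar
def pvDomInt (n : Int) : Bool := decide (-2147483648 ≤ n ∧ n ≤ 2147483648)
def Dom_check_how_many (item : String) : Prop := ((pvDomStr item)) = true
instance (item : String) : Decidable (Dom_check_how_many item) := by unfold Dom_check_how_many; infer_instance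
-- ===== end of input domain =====

-- B splits the string once at the first 'x' (str.partition) and folds the digits of the
-- tail directly into an integer with Horner's rule, with no seen-'x' flag, no per-char
-- try/except probe, and no digit string handed to int() (objective: alternative).

-- ===== PORT A =====
-- the for-loop of A: state = (check, final); per char, try int(char) — on a single
-- character int succeeds exactly when it is a decimal digit, with value c - '0'
-- (hand-ported as isdigit; exact on the ASCII domain) — and A appends str(total).
def checkHowManyLoop : List Char → Bool → List Char → List Char
  | [], _, final => final
  | c :: rest, check, final =>
    let other_check := PySem.Chars.isdigit c
    let final' := if check && other_check then
        final ++ PySem.Int.toChars ((c.toNat : Int) - 48) else final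
    let check' := if c = 'x' then true else check
    checkHowManyLoop rest check' final'

-- int(final): final is by construction a string of ASCII digits '0'..'9' only, where
-- int() is the base-10 value of the digits and int('') raises ValueError (= none,
-- excluded by Pre_); hand-ported as this digit fold, exact on such digit-only strings.
def intOfDigits? : List Char → Option Int
  | [] => none
  | cs => some (cs.foldl (fun a c => a * 10 + ((c.toNat : Int) - 48)) 0)

def check_how_many (item : String) : Int :=
  (intOfDigits? (checkHowManyLoop item.toList false [])).getD 0

-- ===== PORT B =====
-- one step of B's for-loop: value is None until a digit is seen, then Horner
def altDigitStep (v : Option Int) (c : Char) : Option Int :=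
  if '0' ≤ c ∧ c ≤ '9' then some ((v.getD 0) * 10 + ((c.toNat : Int) - 48)) else v

-- item.partition('x')[2]: everything after the first 'x', or '' when 'x' is absent;
-- then the fold, and the final 'value is None' raise (ValueError) is excluded by Pre_
def check_how_many_alt (item : String) : Int :=
  let tail := if 'x' ∈ item.toList then ((item.toList).dropWhile (· ≠ 'x')).tail else []
  (tail.foldl altDigitStep none).getD 0

-- ===== PRECONDITION & SPEC =====
-- Pre_ holds exactly where Python A returns: the string contains an 'x' and at least
-- one decimal digit after the first 'x' (otherwise A's int('') raises ValueError;
-- B's 'value is None' raise fires on exactly the same inputs).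
def Pre_check_how_many (item : String) : Prop :=
  'x' ∈ item.toList ∧
  ((item.toList.dropWhile (· ≠ 'x')).tail.any PySem.Chars.isdigit) = true
instance (item : String) : Decidable (Pre_check_how_many item) := by
  unfold Pre_check_how_many; infer_instance

def pvWitness_check_how_many : String := "x7"

def Spec_check_how_many (item : String) (out : Int) : Prop := out = check_how_many_alt item
instance (item : String) (out : Int) : Decidable (Spec_check_how_many item out) := by
  unfold Spec_check_how_many; infer_instance

-- ===== CLAIM (what is proved, stated in full; the proofs are below) =====
def Claim_equal_check_how_many : Prop := ∀ (item : String), Dom_check_how_many item → Pre_check_how_many item → Spec_check_how_many item (check_how_many item)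

-- ===== LEMMAS AND PROOFS =====

-- B's comparison-chain digit test agrees with isdigit
lemma digit_cond (c : Char) : ('0' ≤ c ∧ c ≤ '9') ↔ PySem.Chars.isdigit c = true := by
  simp only [PySem.Chars.isdigit, Bool.and_eq_true, decide_eq_true_eq, Char.le_def]

-- str(int(c)) is [c] again for a decimal digit c
lemma toChars_digit (c : Char) (h : PySem.Chars.isdigit c = true) :
    PySem.Int.toChars ((c.toNat : Int) - 48) = [c] := by
  have hc : Char.ofNat c.toNat = c := Char.ofNat_toNat c
  have hb : 48 ≤ c.toNat ∧ c.toNat ≤ 57 := by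
    simp only [PySem.Chars.isdigit, Bool.and_eq_true, decide_eq_true_eq, Char.le_def] at h
    exact h
  obtain ⟨h1, h2⟩ := hb
  interval_cases h' : c.toNat <;> rw [← hc] <;> decide

-- once the flag is set, A's loop appends exactly the digits of the rest
lemma checkHowManyLoop_true (l : List Char) (final : List Char) :
    checkHowManyLoop l true final = final ++ l.filter PySem.Chars.isdigit := by
  induction l generalizing final with
  | nil => simp [checkHowManyLoop]
  | cons c rest ih =>
    simp only [checkHowManyLoop]
    have hck : (if c = 'x' then true else true) = true := by split <;> rfl
    rw [hck]
    by_cases hd : PySem.Chars.isdigit c = true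
    · rw [ih]
      simp [hd, toChars_digit c hd]
    · simp only [Bool.not_eq_true] at hd
      rw [ih]
      simp [hd]

-- before the flag is set, A's loop skips up to and including the first 'x'
lemma checkHowManyLoop_false (l : List Char) (final : List Char) :
    checkHowManyLoop l false final =
      final ++ (l.dropWhile (· ≠ 'x')).tail.filter PySem.Chars.isdigit := by
  induction l generalizing final with
  | nil => simp [checkHowManyLoop]
  | cons c rest ih =>
    simp only [checkHowManyLoop, Bool.false_and]
    by_cases hx : c = 'x'
    · subst hx
      rw [if_pos rfl, checkHowManyLoop_true]
      simp [List.dropWhile]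
    · rw [if_neg hx, ih]
      simp [List.dropWhile, hx]

-- once B's value is some a, the fold is Horner over the remaining digits
lemma foldl_altDigitStep_some (l : List Char) (a : Int) :
    l.foldl altDigitStep (some a) =
      some ((l.filter PySem.Chars.isdigit).foldl
        (fun a c => a * 10 + ((c.toNat : Int) - 48)) a) := by
  induction l generalizing a with
  | nil => simp
  | cons c rest ih =>
    by_cases hd : PySem.Chars.isdigit c = true
    · simp only [List.foldl_cons, altDigitStep, if_pos ((digit_cond c).mpr hd),
        Option.getD_some, List.filter_cons_of_pos hd]
      exact ih _
    · have hd' : ¬ ('0' ≤ c ∧ c ≤ '9') := fun h => hd ((digit_cond c).mp h)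
      simp only [List.foldl_cons, altDigitStep, if_neg hd',
        List.filter_cons_of_neg (by simpa using hd)]
      exact ih a

-- from None, B's fold equals A's int over the filtered digits
lemma foldl_altDigitStep_none (l : List Char) :
    (l.foldl altDigitStep none) = intOfDigits? (l.filter PySem.Chars.isdigit) := by
  induction l with
  | nil => simp [intOfDigits?]
  | cons c rest ih =>
    by_cases hd : PySem.Chars.isdigit c = true
    · simp only [List.foldl_cons, altDigitStep, if_pos ((digit_cond c).mpr hd),
        Option.getD_none, List.filter_cons_of_pos hd]
      rw [foldl_altDigitStep_some]
      simp [intOfDigits?]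
    · have hd' : ¬ ('0' ≤ c ∧ c ≤ '9') := fun h => hd ((digit_cond c).mp h)
      simp only [List.foldl_cons, altDigitStep, if_neg hd',
        List.filter_cons_of_neg (by simpa using hd)]
      exact ih

-- when there is no 'x', dropWhile (≠ 'x') drops everything
lemma dropWhile_no_x (l : List Char) (h : 'x' ∉ l) : l.dropWhile (· ≠ 'x') = [] := by
  rw [List.dropWhile_eq_nil_iff]
  intro c hc
  simp only [ne_eq, decide_eq_true_eq]
  exact fun he => h (he ▸ hc)

-- ===== VERDICT (by name: the statement is the Claim_ definition above) =====
theorem check_how_many_spec : Claim_equal_check_how_many := by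
  intro item _ _
  unfold Spec_check_how_many check_how_many check_how_many_alt
  rw [checkHowManyLoop_false]
  by_cases hx : 'x' ∈ item.toList
  · rw [if_pos hx]
    show _ = (List.foldl altDigitStep none _).getD 0
    rw [foldl_altDigitStep_none]
    simp
  · rw [if_neg hx, dropWhile_no_x _ hx]
    simp [intOfDigits?]
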